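-- pv_equiv track=rewrite | github.com/vllm-project/vllm | vllm/model_executor/layers/quantization/bitsandbytes.py | is_layer_skipped_bnb
-- ===== SOURCE A (Python) =====
-- def is_layer_skipped_bnb(prefix: str, llm_int8_skip_modules: list[str]):
--     # Split the prefix into its dot-separated components
--     components = prefix.split('.')
--
--     # Check if any of the skip modules exactly matches any component
--     substr_check = any(module_name in components
--                        for module_name in llm_int8_skip_modules)
--
--     # Allow certain layers to not be quantized
--     set_components = set(".".join(components[:i + 1])
--                          for i in range(len(components)))
--     set_llm_int8_skip_modules = set(llm_int8_skip_modules)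
--     prefix_check = len(set_llm_int8_skip_modules & set_components) != 0
--
--     return substr_check or prefix_check
-- ===== SOURCE B (Python) =====
-- def is_layer_skipped_bnb(prefix: str, llm_int8_skip_modules: list[str]):
--     # One loop over the skip modules; no materialized set of cumulative prefixes.
--     components = prefix.split('.')
--     for module_name in llm_int8_skip_modules:
--         if (module_name in components or prefix == module_name
--                 or prefix.startswith(module_name + '.')):
--             return True
--     return False
-- ===== Notes on version B (the rewrite author's own statement) =====
-- stated objective: simpler
-- what changed: Drops the materialized set of cumulative dot-prefixes and the set intersection: one loop over the skip modules testing exact component membership or the anchored prefix relation 'prefix == m or prefix.startswith(m + ".")', which exactly characterizes the cumulative prefixes.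
import Mathlib
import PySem

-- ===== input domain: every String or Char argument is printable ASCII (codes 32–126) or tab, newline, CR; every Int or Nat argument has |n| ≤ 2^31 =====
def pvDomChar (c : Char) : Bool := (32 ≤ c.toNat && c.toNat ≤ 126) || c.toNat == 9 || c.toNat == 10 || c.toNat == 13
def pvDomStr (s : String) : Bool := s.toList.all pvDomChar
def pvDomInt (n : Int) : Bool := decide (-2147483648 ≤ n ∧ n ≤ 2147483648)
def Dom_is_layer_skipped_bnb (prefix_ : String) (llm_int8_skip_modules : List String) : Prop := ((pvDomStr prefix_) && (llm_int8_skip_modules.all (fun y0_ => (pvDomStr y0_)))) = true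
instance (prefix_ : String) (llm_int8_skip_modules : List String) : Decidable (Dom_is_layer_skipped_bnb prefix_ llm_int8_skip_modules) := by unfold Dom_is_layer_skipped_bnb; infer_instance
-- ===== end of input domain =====

-- B drops A's materialized set of cumulative dot-prefixes and its set intersection; it loops once
-- over the skip modules testing component membership or the anchored startswith relation (simpler).

-- ===== PORT A =====
def is_layer_skipped_bnb (prefix_ : String) (llm_int8_skip_modules : List String) : Bool :=
  -- components = prefix.split('.')
  let components := (PySem.Str.split? prefix_ ".").getD []
  -- substr_check = any(module_name in components for module_name in llm_int8_skip_modules)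
  let substr_check := llm_int8_skip_modules.any (fun module_name => components.contains module_name)
  -- set_components = set(".".join(components[:i + 1]) for i in range(len(components)))
  let set_components := PySem.Set.ofList
    ((PySem.List.pyRange 0 (components.length : Int) 1).map
      (fun i => PySem.Str.join "." (PySem.List.slice components none (some (i + 1)))))
  -- set_llm_int8_skip_modules = set(llm_int8_skip_modules)
  let set_llm_int8_skip_modules := PySem.Set.ofList llm_int8_skip_modules
  -- prefix_check = len(set_llm_int8_skip_modules & set_components) != 0
  let prefix_check := PySem.Set.len (PySem.Set.inter set_llm_int8_skip_modules set_components) != 0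
  substr_check || prefix_check

-- ===== PORT B =====
def is_layer_skipped_bnb_alt (prefix_ : String) (llm_int8_skip_modules : List String) : Bool :=
  let components := (PySem.Str.split? prefix_ ".").getD []
  llm_int8_skip_modules.any (fun module_name =>
    components.contains module_name || prefix_ == module_name
      || PySem.Str.startswith prefix_ (module_name ++ "."))

-- ===== PRECONDITION & SPEC =====
def Spec_is_layer_skipped_bnb (prefix_ : String) (llm_int8_skip_modules : List String) (out : Bool) : Prop := out = is_layer_skipped_bnb_alt prefix_ llm_int8_skip_modules
instance (prefix_ : String) (llm_int8_skip_modules : List String) (out : Bool) : Decidable (Spec_is_layer_skipped_bnb prefix_ llm_int8_skip_modules out) := by unfold Spec_is_layer_skipped_bnb; infer_instance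

-- ===== CLAIM (what is proved, stated in full; the proofs are below) =====
def Claim_equal_is_layer_skipped_bnb : Prop := ∀ (prefix_ : String) (llm_int8_skip_modules : List String), Dom_is_layer_skipped_bnb prefix_ llm_int8_skip_modules → Spec_is_layer_skipped_bnb prefix_ llm_int8_skip_modules (is_layer_skipped_bnb prefix_ llm_int8_skip_modules)

-- ===== LEMMAS AND PROOFS =====

-- s.split('.') at the List Char level, by simple structural recursion
def pvSplitDot : List Char → List (List Char)
  | [] => [[]]
  | c :: rest =>
    if c = '.' then [] :: pvSplitDot rest
    else
      match pvSplitDot rest with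
      | [] => [[c]]
      | p :: ps => (c :: p) :: ps

theorem pvSplitDot_ne_nil (l : List Char) : pvSplitDot l ≠ [] := by
  cases l with
  | nil => simp [pvSplitDot]
  | cons c rest =>
    simp only [pvSplitDot]
    split
    · simp
    · split <;> simp

-- prepend to the head piece
def pvConsHead (p : List Char) : List (List Char) → List (List Char)
  | [] => []
  | x :: xs => (p ++ x) :: xs

theorem pvGo_nil (fuel : Nat) (cur : List Char) (acc : List (List Char)) :
    PySem.Chars.splitOn.go ['.'] (fuel + 1) [] cur acc = (cur.reverse :: acc).reverse := rfl

theorem pvGo_cons (fuel : Nat) (c : Char) (rest cur : List Char) (acc : List (List Char)) :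
    PySem.Chars.splitOn.go ['.'] (fuel + 1) (c :: rest) cur acc =
      if (['.'] : List Char).isPrefixOf (c :: rest) then
        PySem.Chars.splitOn.go ['.'] fuel rest [] (cur.reverse :: acc)
      else PySem.Chars.splitOn.go ['.'] fuel rest (c :: cur) acc := rfl

theorem pvGo_eq (fuel : Nat) : ∀ (l cur : List Char) (acc : List (List Char)),
    l.length < fuel →
    PySem.Chars.splitOn.go ['.'] fuel l cur acc = acc.reverse ++ pvConsHead cur.reverse (pvSplitDot l) := by
  induction fuel with
  | zero => intro l cur acc h; omega
  | succ fuel ih =>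
    intro l cur acc h
    cases l with
    | nil => rw [pvGo_nil]; simp [pvSplitDot, pvConsHead]
    | cons c rest =>
      obtain ⟨p, ps, hps⟩ : ∃ p ps, pvSplitDot rest = p :: ps := by
        cases hx : pvSplitDot rest with
        | nil => exact absurd hx (pvSplitDot_ne_nil rest)
        | cons p ps => exact ⟨p, ps, rfl⟩
      rw [pvGo_cons]
      by_cases hc : c = '.'
      · subst hc
        rw [if_pos (by simp [List.isPrefixOf])]
        rw [ih _ _ _ (by simp at h ⊢; omega)]
        simp [pvSplitDot, hps, pvConsHead]
      · rw [if_neg (by simp [List.isPrefixOf]; exact fun h' => hc h'.symm)]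
        rw [ih _ _ _ (by simp at h ⊢; omega)]
        simp [pvSplitDot, hc, hps, pvConsHead]

theorem pvSplitOn_eq (s : List Char) : PySem.Chars.splitOn s ['.'] = pvSplitDot s := by
  unfold PySem.Chars.splitOn
  rw [pvGo_eq (s.length + 1) s [] [] (by omega)]
  cases hps : pvSplitDot s with
  | nil => exact absurd hps (pvSplitDot_ne_nil s)
  | cons p ps => simp [pvConsHead]

theorem pvJoin_pvSplitDot (l : List Char) : PySem.Chars.join ['.'] (pvSplitDot l) = l := by
  induction l with
  | nil => simp [pvSplitDot, PySem.Chars.join_singleton]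
  | cons c rest ih =>
    simp only [pvSplitDot]
    by_cases hc : c = '.'
    · rw [if_pos hc]
      cases hps : pvSplitDot rest with
      | nil => exact absurd hps (pvSplitDot_ne_nil rest)
      | cons p ps =>
        rw [hps] at ih
        rw [PySem.Chars.join_cons_cons, ih, hc]
        simp
    · rw [if_neg hc]
      cases hps : pvSplitDot rest with
      | nil => exact absurd hps (pvSplitDot_ne_nil rest)
      | cons p ps =>
        rw [hps] at ih
        cases ps with
        | nil => rw [PySem.Chars.join_singleton] at ih ⊢; simp [ih]
        | cons q qs =>
          rw [PySem.Chars.join_cons_cons] at ih ⊢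
          simp only [List.cons_append, List.cons.injEq] at ih ⊢
          simp [ih]

theorem pvDot_not_mem_pvSplitDot (l : List Char) : ∀ p ∈ pvSplitDot l, '.' ∉ p := by
  induction l with
  | nil => simp [pvSplitDot]
  | cons c rest ih =>
    simp only [pvSplitDot]
    by_cases hc : c = '.'
    · rw [if_pos hc]
      intro p hp
      rcases List.mem_cons.mp hp with h | h
      · simp [h]
      · exact ih p h
    · rw [if_neg hc]
      cases hps : pvSplitDot rest with
      | nil => exact absurd hps (pvSplitDot_ne_nil rest)
      | cons p ps =>
        intro q hq
        rcases List.mem_cons.mp hq with h | h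
        · subst h
          intro hmem
          rcases List.mem_cons.mp hmem with h' | h'
          · exact hc h'.symm
          · exact ih p (by rw [hps]; exact List.mem_cons_self) h'
        · exact ih q (by rw [hps]; exact List.mem_cons_of_mem _ h)

-- a dot-terminated prefix cannot fit inside a dot-free piece
theorem pvNo_dot_prefix {p t : List Char} (hp : '.' ∉ p) : ¬ (t ++ ['.'] <+: p) := by
  intro h
  exact hp (h.subset (by simp))

-- the key boundary lemma: t ++ '.' is a prefix of p ++ '.' :: s' (p dot-free) iff t = p
-- or t continues past the separator
theorem pvPrefix_dot_iff (p : List Char) (s' t : List Char) (hp : '.' ∉ p) :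
    (t ++ ['.'] <+: p ++ '.' :: s') ↔ (t = p ∨ ∃ t', t = p ++ '.' :: t' ∧ t' ++ ['.'] <+: s') := by
  induction p generalizing t with
  | nil =>
    cases t with
    | nil => simp
    | cons c t₂ =>
      simp only [List.cons_append, List.nil_append, List.cons_prefix_cons]
      constructor
      · rintro ⟨rfl, h⟩
        exact Or.inr ⟨t₂, rfl, h⟩
      · rintro (h | ⟨t', ht, h⟩)
        · exact absurd h (List.cons_ne_nil _ _)
        · injection ht with h1 h2
          exact ⟨h1, h2 ▸ h⟩
  | cons a p₂ ih =>
    have hp₂ : '.' ∉ p₂ := fun h => hp (List.mem_cons_of_mem _ h)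
    have ha : a ≠ '.' := fun h => hp (h ▸ List.mem_cons_self)
    cases t with
    | nil =>
      simp only [List.nil_append, List.cons_append, List.cons_prefix_cons]
      constructor
      · rintro ⟨h, -⟩; exact absurd h.symm ha
      · rintro (h | ⟨t', ht, -⟩) <;> simp_all
    | cons c t₂ =>
      simp only [List.cons_append, List.cons_prefix_cons]
      rw [ih t₂ hp₂]
      constructor
      · rintro ⟨rfl, h | ⟨t', rfl, h⟩⟩
        · exact Or.inl (by rw [h])
        · exact Or.inr ⟨t', rfl, h⟩
      · rintro (h | ⟨t', ht, h⟩)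
        · injection h with h1 h2; exact ⟨h1, Or.inl h2⟩
        · injection ht with h1 h2
          exact ⟨h1, Or.inr ⟨t', h2, h⟩⟩

-- join over a cons with a nonempty tail
theorem pvJoin_cons_take (p : List Char) (l : List (List Char)) (hl : l ≠ []) :
    PySem.Chars.join ['.'] (p :: l) = p ++ '.' :: PySem.Chars.join ['.'] l := by
  cases l with
  | nil => exact absurd rfl hl
  | cons q qs => rw [PySem.Chars.join_cons_cons]; simp

-- membership in the cumulative joins = "equal or anchored proper prefix"
theorem pvCum_iff (ps : List (List Char)) (hne : ps ≠ []) (hfree : ∀ p ∈ ps, '.' ∉ p)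
    (t : List Char) :
    (∃ k, k < ps.length ∧ t = PySem.Chars.join ['.'] (ps.take (k + 1))) ↔
      (t = PySem.Chars.join ['.'] ps ∨ t ++ ['.'] <+: PySem.Chars.join ['.'] ps) := by
  induction ps generalizing t with
  | nil => exact absurd rfl hne
  | cons p ps ih =>
    have hpfree : '.' ∉ p := hfree p List.mem_cons_self
    cases ps with
    | nil =>
      constructor
      · rintro ⟨k, hk, rfl⟩
        left
        have hk0 : k = 0 := by simpa using hk
        subst hk0
        rw [List.take_succ_cons, List.take_zero]
      · rintro (rfl | h)
        · refine ⟨0, by simp, ?_⟩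
          rw [List.take_succ_cons, List.take_zero]
        · rw [PySem.Chars.join_singleton] at h
          exact absurd h (pvNo_dot_prefix hpfree)
    | cons q qs =>
      have hqne : (q :: qs) ≠ [] := by simp
      have hqfree : ∀ r ∈ q :: qs, '.' ∉ r := fun r hr => hfree r (List.mem_cons_of_mem _ hr)
      have ihq := ih hqne hqfree
      rw [pvJoin_cons_take p _ hqne, pvPrefix_dot_iff p _ t hpfree]
      constructor
      · rintro ⟨k, hk, rfl⟩
        cases k with
        | zero =>
          right; left
          rw [List.take_succ_cons, List.take_zero, PySem.Chars.join_singleton]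
        | succ j =>
          have hj : j < (q :: qs).length := by simpa using hk
          have htake : (p :: q :: qs).take (j + 1 + 1) = p :: (q :: qs).take (j + 1) := rfl
          have htne : (q :: qs).take (j + 1) ≠ [] := by simp
          rw [htake, pvJoin_cons_take p _ htne]
          rcases (ihq _).mp ⟨j, hj, rfl⟩ with h | h
          · left; rw [h]
          · right; right; exact ⟨_, rfl, h⟩
      · rintro (h | h | ⟨t', rfl, h⟩)
        · refine ⟨(q :: qs).length, by simp, ?_⟩
          rw [List.take_of_length_le (by simp), pvJoin_cons_take p _ hqne, h]
        · refine ⟨0, by simp, ?_⟩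
          rw [List.take_succ_cons, List.take_zero, PySem.Chars.join_singleton, h]
        · rcases (ihq t').mpr (Or.inr h) with ⟨j, hj, rfl⟩
          refine ⟨j + 1, by simpa using hj, ?_⟩
          have htake : (p :: q :: qs).take (j + 1 + 1) = p :: (q :: qs).take (j + 1) := rfl
          have htne : (q :: qs).take (j + 1) ≠ [] := by simp
          rw [htake, pvJoin_cons_take p _ htne]

-- the components list both ports compute
theorem pvComponents_eq (prefix_ : String) :
    (PySem.Str.split? prefix_ ".").getD [] = (pvSplitDot prefix_.toList).map String.ofList := by
  have hsep : (".".toList : List Char) = ['.'] := by decide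
  simp [PySem.Str.split?, PySem.Chars.split?, hsep, pvSplitOn_eq]

-- each element of A's cumulative comprehension, at the List Char level
theorem pvElem_eq (prefix_ : String) (k : Nat) :
    PySem.Str.join "." (PySem.List.slice ((PySem.Str.split? prefix_ ".").getD []) none (some ((0 : Int) + k + 1)))
      = String.ofList (PySem.Chars.join ['.'] ((pvSplitDot prefix_.toList).take (k + 1))) := by
  rw [pvComponents_eq, PySem.List.slice_to _ (by omega)]
  have ht : ((0 : Int) + k + 1).toNat = k + 1 := by omega
  rw [ht, ← List.map_take, PySem.Str.join]
  have hsep : (".".toList : List Char) = ['.'] := by decide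
  have hco : (String.toList ∘ String.ofList) = id := funext (fun l => String.toList_ofList)
  rw [hsep, List.map_map, hco, List.map_id]

theorem pvLen_components (prefix_ : String) :
    ((PySem.Str.split? prefix_ ".").getD []).length = (pvSplitDot prefix_.toList).length := by
  rw [pvComponents_eq]; simp

-- A's list of cumulative prefixes, membership characterized
theorem pvMem_cum_iff (prefix_ m : String) :
    (m ∈ (PySem.List.pyRange 0 (((PySem.Str.split? prefix_ ".").getD []).length : Int) 1).map
        (fun i => PySem.Str.join "." (PySem.List.slice ((PySem.Str.split? prefix_ ".").getD []) none (some (i + 1)))))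
    ↔ (prefix_ = m ∨ m.toList ++ ['.'] <+: prefix_.toList) := by
  constructor
  · intro h
    rcases List.mem_map.mp h with ⟨i, hi, hm⟩
    rw [PySem.List.pyRange_one] at hi
    rcases List.mem_map.mp hi with ⟨k, hk, rfl⟩
    rw [List.mem_range] at hk
    have hk2 : k < (pvSplitDot prefix_.toList).length := by
      have hl := pvLen_components prefix_
      simp at hk
      omega
    rw [pvElem_eq] at hm
    have hmt : m.toList = PySem.Chars.join ['.'] ((pvSplitDot prefix_.toList).take (k + 1)) := by
      rw [← hm, String.toList_ofList]
    have hc := (pvCum_iff _ (pvSplitDot_ne_nil _) (pvDot_not_mem_pvSplitDot _) m.toList).mp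
      ⟨k, hk2, hmt⟩
    rw [pvJoin_pvSplitDot] at hc
    rcases hc with h' | h'
    · exact Or.inl (String.toList_inj.mp h'.symm)
    · exact Or.inr h'
  · intro h
    have h' : m.toList = PySem.Chars.join ['.'] (pvSplitDot prefix_.toList) ∨
        m.toList ++ ['.'] <+: PySem.Chars.join ['.'] (pvSplitDot prefix_.toList) := by
      rw [pvJoin_pvSplitDot]
      rcases h with h | h
      · exact Or.inl (by rw [h])
      · exact Or.inr h
    rcases (pvCum_iff _ (pvSplitDot_ne_nil _) (pvDot_not_mem_pvSplitDot _) m.toList).mpr h'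
      with ⟨k, hk, hmt⟩
    refine List.mem_map.mpr ⟨(0 : Int) + k, ?_, ?_⟩
    · rw [PySem.List.pyRange_one]
      refine List.mem_map.mpr ⟨k, List.mem_range.mpr ?_, rfl⟩
      have hl := pvLen_components prefix_
      simp
      omega
    · rw [pvElem_eq]
      apply String.toList_inj.mp
      rw [String.toList_ofList, ← hmt]

-- a nonempty PySem.Set has nonzero len, and conversely
theorem pvLen_ne_of_mem (s : PySem.Set String) (y : String) (hy : y ∈ s) :
    PySem.Set.len s ≠ 0 := by
  rw [PySem.Set.len]
  intro h0
  exact List.ne_nil_of_mem hy (List.length_eq_zero_iff.mp (by exact_mod_cast h0))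

theorem pvExists_of_len_ne (s : PySem.Set String) (h : PySem.Set.len s ≠ 0) :
    ∃ y, y ∈ s := by
  rw [PySem.Set.len] at h
  cases s with
  | nil => simp at h
  | cons a t => exact ⟨a, by simp⟩

-- ===== VERDICT (by name: the statement is the Claim_ definition above) =====
theorem is_layer_skipped_bnb_spec : Claim_equal_is_layer_skipped_bnb := by
  intro prefix_ mods _
  unfold Spec_is_layer_skipped_bnb is_layer_skipped_bnb is_layer_skipped_bnb_alt
  rw [Bool.eq_iff_iff]
  simp only [Bool.or_eq_true, List.any_eq_true, bne_iff_ne, List.contains_iff_mem]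
  constructor
  · rintro (⟨m, hm, hmem⟩ | hlen)
    · exact ⟨m, hm, Or.inl (Or.inl hmem)⟩
    · rcases pvExists_of_len_ne _ hlen with ⟨y, hy⟩
      rw [PySem.Set.mem_inter] at hy
      rcases hy with ⟨hy1, hy2⟩
      rw [PySem.Set.mem_ofList] at hy1
      rw [PySem.Set.mem_ofList] at hy2
      rcases (pvMem_cum_iff prefix_ y).mp hy2 with h | h
      · exact ⟨y, hy1, Or.inl (Or.inr (by simp [h]))⟩
      · refine ⟨y, hy1, Or.inr ?_⟩
        rw [PySem.Str.startswith, PySem.Chars.startswith_iff, String.toList_append]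
        simpa using h
  · rintro ⟨m, hm, (hmem | heq) | hsw⟩
    · exact Or.inl ⟨m, hm, hmem⟩
    · right
      have hpm : prefix_ = m := eq_of_beq heq
      refine pvLen_ne_of_mem _ m ?_
      rw [PySem.Set.mem_inter, PySem.Set.mem_ofList, PySem.Set.mem_ofList]
      exact ⟨hm, (pvMem_cum_iff prefix_ m).mpr (Or.inl hpm)⟩
    · right
      rw [PySem.Str.startswith, PySem.Chars.startswith_iff, String.toList_append] at hsw
      have hpre : m.toList ++ ['.'] <+: prefix_.toList := by simpa using hsw
      refine pvLen_ne_of_mem _ m ?_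
      rw [PySem.Set.mem_inter, PySem.Set.mem_ofList, PySem.Set.mem_ofList]
      exact ⟨hm, (pvMem_cum_iff prefix_ m).mpr (Or.inr hpre)⟩
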